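-- pv_equiv track=rewrite | github.com/Santiagobr4/volicion-project | backend/habits/serializers.py | _translate_password_messages
-- ===== SOURCE A (Python) =====
-- def _translate_password_messages(messages):
--     """Translate common Django password validator messages to neutral Spanish."""
--     translated = []
--     for message in messages:
--         lower_message = message.lower()
--         if "too short" in lower_message:
--             translated.append("La contraseña es muy corta. Debe tener al menos 8 caracteres.")
--             continue
--         if "too common" in lower_message:
--             translated.append("La contraseña es demasiado común. Elige una más segura.")
--             continue
--         if "entirely numeric" in lower_message:
--             translated.append("La contraseña no puede ser solo números.")
--             continue
--         if "too similar" in lower_message: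
--             translated.append("La contraseña es muy parecida a tus datos de cuenta.")
--             continue
--         translated.append(message)
--     return translated
-- ===== SOURCE B (Python) =====
-- _RULES = [
--     ("too short", "La contraseña es muy corta. Debe tener al menos 8 caracteres."),
--     ("too common", "La contraseña es demasiado común. Elige una más segura."),
--     ("entirely numeric", "La contraseña no puede ser solo números."),
--     ("too similar", "La contraseña es muy parecida a tus datos de cuenta."),
-- ]
--
--
-- def _translate_password_messages(messages):
--     """Translate common Django password validator messages to neutral Spanish."""
--     translated = [None] * len(messages)
--     for needle, replacement in _RULES:
--         for i, message in enumerate(messages):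
--             if translated[i] is None and needle in message.lower():
--                 translated[i] = replacement
--     return [t if t is not None else m for t, m in zip(translated, messages)]
-- ===== Notes on version B (the rewrite author's own statement) =====
-- stated objective: alternative
-- what changed: Rule-major staged passes: a fixed Option buffer is swept once per translation rule over the whole list (earlier rules claim positions first), then unmatched slots fall back to the original message, instead of A's message-major if/continue branch cascade with an append accumulator.
import Mathlib
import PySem

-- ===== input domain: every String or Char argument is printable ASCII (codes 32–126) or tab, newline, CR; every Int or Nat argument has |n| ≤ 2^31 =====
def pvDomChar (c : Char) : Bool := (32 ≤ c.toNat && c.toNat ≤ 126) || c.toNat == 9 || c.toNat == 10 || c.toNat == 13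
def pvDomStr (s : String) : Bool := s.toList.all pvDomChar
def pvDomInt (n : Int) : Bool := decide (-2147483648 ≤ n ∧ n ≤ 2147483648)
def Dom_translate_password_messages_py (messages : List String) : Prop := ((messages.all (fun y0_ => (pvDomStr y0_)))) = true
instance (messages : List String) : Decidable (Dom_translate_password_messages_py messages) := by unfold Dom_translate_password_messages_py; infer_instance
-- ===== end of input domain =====

-- B replaces A's message-major if/continue cascade with rule-major staged passes:
-- one whole-list sweep per rule over an Option buffer, then a fallback pass (alternative; same cost).

-- ===== PORT A =====
def translate_password_messages_py (messages : List String) : List String :=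
  messages.foldl (fun translated message =>
    let lower_message := PySem.Str.lower message
    if PySem.Str.isIn "too short" lower_message then
      translated ++ ["La contraseña es muy corta. Debe tener al menos 8 caracteres."]
    else if PySem.Str.isIn "too common" lower_message then
      translated ++ ["La contraseña es demasiado común. Elige una más segura."]
    else if PySem.Str.isIn "entirely numeric" lower_message then
      translated ++ ["La contraseña no puede ser solo números."]
    else if PySem.Str.isIn "too similar" lower_message then
      translated ++ ["La contraseña es muy parecida a tus datos de cuenta."]
    else
      translated ++ [message]) []

-- ===== PORT B =====
def pvRules : List (String × String) :=
  [("too short", "La contraseña es muy corta. Debe tener al menos 8 caracteres."),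
   ("too common", "La contraseña es demasiado común. Elige una más segura."),
   ("entirely numeric", "La contraseña no puede ser solo números."),
   ("too similar", "La contraseña es muy parecida a tus datos de cuenta.")]

-- one rule's whole-list pass: 'for i, message in enumerate(messages): if translated[i] is None and needle in message.lower(): translated[i] = replacement'
def pvApplyRule (rule : String × String) (translated : List (Option String)) (messages : List String) : List (Option String) :=
  List.zipWith (fun t m => if t = none ∧ PySem.Str.isIn rule.1 (PySem.Str.lower m) then some rule.2 else t) translated messages

def translate_password_messages_py_alt (messages : List String) : List String :=
  let translated := pvRules.foldl (fun st rule => pvApplyRule rule st messages) (messages.map (fun _ => none))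
  List.zipWith (fun t m => t.getD m) translated messages

-- ===== PRECONDITION & SPEC =====
def Spec_translate_password_messages_py (messages : List String) (out : List String) : Prop := out = translate_password_messages_py_alt messages
instance (messages : List String) (out : List String) : Decidable (Spec_translate_password_messages_py messages out) := by unfold Spec_translate_password_messages_py; infer_instance

-- ===== CLAIM (what is proved, stated in full; the proofs are below) =====
def Claim_equal_translate_password_messages_py : Prop := ∀ (messages : List String), Dom_translate_password_messages_py messages → Spec_translate_password_messages_py messages (translate_password_messages_py messages)

-- ===== LEMMAS AND PROOFS =====
-- A's per-message result, factored out so the foldl-append shape can be cited.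
def pvAmsg (message : String) : String :=
  let lower_message := PySem.Str.lower message
  if PySem.Str.isIn "too short" lower_message then
    "La contraseña es muy corta. Debe tener al menos 8 caracteres."
  else if PySem.Str.isIn "too common" lower_message then
    "La contraseña es demasiado común. Elige una más segura."
  else if PySem.Str.isIn "entirely numeric" lower_message then
    "La contraseña no puede ser solo números."
  else if PySem.Str.isIn "too similar" lower_message then
    "La contraseña es muy parecida a tus datos de cuenta."
  else message

-- B's per-position result: the first rule (in pvRules order) whose needle matches, else the original.
def pvBmsg (message : String) : String :=
  (pvRules.foldl (fun t rule =>
      if t = none ∧ PySem.Str.isIn rule.1 (PySem.Str.lower message) then some rule.2 else t) none).getD message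

-- the rule-major fold of pointwise zipWith passes decomposes head/tail
theorem pv_foldl_zipWith_cons
    (g : (String × String) → Option String → String → Option String)
    (rules : List (String × String)) (t : Option String) (ts : List (Option String))
    (m : String) (ms : List String) :
    rules.foldl (fun st r => List.zipWith (fun o x => g r o x) st (m :: ms)) (t :: ts)
      = rules.foldl (fun o r => g r o m) t
        :: rules.foldl (fun st r => List.zipWith (fun o x => g r o x) st ms) ts := by
  induction rules generalizing t ts with
  | nil => rfl
  | cons r rs ih => simp only [List.foldl_cons, List.zipWith_cons_cons, ih]

theorem pv_alt_eq_map (messages : List String) :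
    translate_password_messages_py_alt messages = messages.map pvBmsg := by
  induction messages with
  | nil => rfl
  | cons m ms ih =>
      simp only [translate_password_messages_py_alt, pvApplyRule, List.map_cons]
      rw [pv_foldl_zipWith_cons (fun r o x => if o = none ∧ PySem.Str.isIn r.1 (PySem.Str.lower x)
            then some r.2 else o)]
      simp only [List.zipWith_cons_cons]
      exact congrArg₂ _ rfl ih

theorem pvBmsg_eq_pvAmsg (m : String) : pvBmsg m = pvAmsg m := by
  simp only [pvBmsg, pvAmsg, pvRules, List.foldl_cons, List.foldl_nil]
  split_ifs <;> simp_all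

-- ===== VERDICT (by name: the statement is the Claim_ definition above) =====
theorem translate_password_messages_py_spec : Claim_equal_translate_password_messages_py := by
  intro messages _
  show _ = _
  rw [pv_alt_eq_map]
  unfold translate_password_messages_py
  have hbody :
      (fun (translated : List String) (message : String) =>
        let lower_message := PySem.Str.lower message
        if PySem.Str.isIn "too short" lower_message then
          translated ++ ["La contraseña es muy corta. Debe tener al menos 8 caracteres."]
        else if PySem.Str.isIn "too common" lower_message then
          translated ++ ["La contraseña es demasiado común. Elige una más segura."]
        else if PySem.Str.isIn "entirely numeric" lower_message then
          translated ++ ["La contraseña no puede ser solo números."]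
        else if PySem.Str.isIn "too similar" lower_message then
          translated ++ ["La contraseña es muy parecida a tus datos de cuenta."]
        else translated ++ [message])
      = fun translated message => translated ++ [pvAmsg message] := by
    funext t m
    simp only [pvAmsg]
    split_ifs <;> rfl
  rw [hbody, PySem.List.foldl_append_singleton_eq_map]
  simp only [List.nil_append]
  exact List.map_congr_left fun m _ => (pvBmsg_eq_pvAmsg m).symm
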